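-- pv_equiv track=rewrite | github.com/ortemx/university | term2v2/alg/15 N to 10.py | get_system_base
-- ===== SOURCE A (Python) =====
-- def get_system_base(n: int) -> str:
--     if n == 0:
--         return SYSTEM_BASE[0]
--     n = abs(n)
--     system_base = ""
--     while n != 0:
--         system_base = SYSTEM_BASE[n % 10] + system_base
--         n //= 10
--
--     return system_base
--
-- SYSTEM_BASE = {
--     0: "₀",
--     1: "₁",
--     2: "₂",
--     3: "₃",
--     4: "₄",
--     5: "₅",
--     6: "₆",
--     7: "₇",
--     8: "₈",
--     9: "₉",
-- }
-- ===== SOURCE B (Python) =====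
-- _SUB = str.maketrans("0123456789", "\u2080\u2081\u2082\u2083\u2084\u2085\u2086\u2087\u2088\u2089")
--
--
-- def get_system_base(n: int) -> str:
--     return str(abs(n)).translate(_SUB)
-- ===== Notes on version B (the rewrite author's own statement) =====
-- stated objective: idiomatic
-- what changed: B replaces the manual reverse digit-extraction loop (repeated % 10 and //= 10 with string prepending) and the n == 0 special case by formatting abs(n) with str() and translating each decimal character to its subscript glyph via a str.maketrans table.
import Mathlib
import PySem

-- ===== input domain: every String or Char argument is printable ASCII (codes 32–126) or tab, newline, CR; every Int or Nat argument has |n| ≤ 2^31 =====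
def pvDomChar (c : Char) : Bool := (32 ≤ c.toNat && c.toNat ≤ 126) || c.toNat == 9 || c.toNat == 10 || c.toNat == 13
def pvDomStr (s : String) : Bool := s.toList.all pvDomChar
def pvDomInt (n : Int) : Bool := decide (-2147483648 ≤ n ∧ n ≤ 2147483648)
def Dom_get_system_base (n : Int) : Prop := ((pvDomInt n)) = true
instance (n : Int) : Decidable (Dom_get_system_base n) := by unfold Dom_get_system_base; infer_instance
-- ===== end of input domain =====

-- B formats |n| with str() and maps each decimal character to its subscript glyph
-- through a translation table, instead of A's reverse %10 // 10 extraction loop (idiomatic).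


-- ===== PORT A =====
-- the module-level dict SYSTEM_BASE (insertion order), int keys
def pvSYSTEM_BASE : PySem.Dict Int String :=
  PySem.Dict.ofList
  [((0:Int), "₀"), (1, "₁"), (2, "₂"), (3, "₃"), (4, "₄"),
   (5, "₅"), (6, "₆"), (7, "₇"), (8, "₈"), (9, "₉")]

-- the while-loop of A; after `n = abs(n)` the loop variable is a nonnegative int,
-- carried here as a Nat so the loop terminates; Python's n % 10 / n //= 10 on a
-- nonnegative int coincide with Nat's % and /. (Dict lookup is total here: keys 0-9 are
-- always present; .getD "" is never the taken branch.)
def pvLoopA (m : Nat) (acc : String) : String :=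
  if m = 0 then acc
  else pvLoopA (m / 10) (((PySem.Dict.get? pvSYSTEM_BASE ((m % 10 : Nat) : Int)).getD "") ++ acc)
decreasing_by exact Nat.div_lt_self (Nat.pos_of_ne_zero (by assumption)) (by norm_num)

def get_system_base (n : Int) : String :=
  if n = 0 then (PySem.Dict.get? pvSYSTEM_BASE 0).getD ""
  else pvLoopA n.natAbs ""

-- ===== PORT B =====
-- str.maketrans("0123456789", "₀₁₂₃₄₅₆₇₈₉"): a character-to-character table
def pvTr (c : Char) : Char :=
  match c with
  | '0' => '₀' | '1' => '₁' | '2' => '₂' | '3' => '₃' | '4' => '₄'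
  | '5' => '₅' | '6' => '₆' | '7' => '₇' | '8' => '₈' | '9' => '₉'
  | c => c

-- str(abs(n)).translate(_SUB)
def get_system_base_alt (n : Int) : String :=
  String.ofList ((PySem.Int.toStr ((n.natAbs : Nat) : Int)).toList.map pvTr)

-- ===== PRECONDITION & SPEC =====
def Spec_get_system_base (n : Int) (out : String) : Prop := out = get_system_base_alt n
instance (n : Int) (out : String) : Decidable (Spec_get_system_base n out) := by unfold Spec_get_system_base; infer_instance

-- ===== CLAIM (what is proved, stated in full; the proofs are below) =====
def Claim_equal_get_system_base : Prop := ∀ (n : Int), Dom_get_system_base n → Spec_get_system_base n (get_system_base n)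

-- ===== LEMMAS AND PROOFS =====

-- reference form of Nat.toDigits 10 (proof helper only)
def pvRef (m : Nat) : List Char :=
  if _h : m < 10 then [Nat.digitChar m]
  else pvRef (m / 10) ++ [Nat.digitChar (m % 10)]
decreasing_by exact Nat.div_lt_self (by omega) (by norm_num)

theorem pvToDigitsCore_eq_ref : ∀ (f n : Nat) (acc : List Char), n < f →
    Nat.toDigitsCore 10 f n acc = pvRef n ++ acc := by
  intro f
  induction f with
  | zero => intro n acc h; omega
  | succ f ih =>
    intro n acc h
    by_cases h10 : n < 10
    · have hdiv : n / 10 = 0 := Nat.div_eq_of_lt h10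
      simp [Nat.toDigitsCore, hdiv, pvRef, h10, Nat.mod_eq_of_lt h10]
    · have hdiv : n / 10 ≠ 0 := by
        intro hc; exact h10 (by omega : n < 10)
      have hlt : n / 10 < f := by
        have := Nat.div_lt_self (by omega : 0 < n) (by norm_num : 1 < 10)
        omega
      rw [Nat.toDigitsCore]
      simp only [hdiv]
      rw [ih (n / 10) _ hlt]
      conv_rhs => rw [pvRef]
      simp [h10]

theorem pvToDigits_eq_ref (m : Nat) : Nat.toDigits 10 m = pvRef m :=
  (pvToDigitsCore_eq_ref (m + 1) m [] (Nat.lt_succ_self m)).trans (List.append_nil _)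

-- the dict lookup of a digit is exactly the one-char string of its translated glyph
theorem pvLookup_eq (d : Nat) (h : d < 10) :
    (PySem.Dict.get? pvSYSTEM_BASE ((d : Nat) : Int)).getD "" =
      String.ofList [pvTr (Nat.digitChar d)] := by
  interval_cases d <;> decide

theorem pvLoopA_eq (m : Nat) (hm : 0 < m) : ∀ acc : String,
    pvLoopA m acc = String.ofList ((pvRef m).map pvTr) ++ acc := by
  induction m using Nat.strong_induction_on with
  | _ m ih =>
    intro acc
    rw [pvLoopA, if_neg (by omega)]
    by_cases h10 : m < 10
    · have hdiv : m / 10 = 0 := Nat.div_eq_of_lt h10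
      rw [hdiv, pvLoopA, if_pos rfl]
      rw [pvRef]
      simp only [h10, dif_pos]
      rw [Nat.mod_eq_of_lt h10, pvLookup_eq m h10]
      simp
    · have hdiv : 0 < m / 10 := Nat.div_pos (by omega) (by norm_num)
      have hlt : m / 10 < m := Nat.div_lt_self hm (by norm_num)
      rw [ih (m / 10) hlt hdiv]
      rw [pvLookup_eq (m % 10) (Nat.mod_lt m (by norm_num))]
      conv_rhs => rw [pvRef]
      simp only [h10, dif_neg, not_false_iff, List.map_append, List.map_cons, List.map_nil]
      rw [← String.append_assoc]
      simp

-- ===== VERDICT (by name: the statement is the Claim_ definition above) =====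
theorem get_system_base_spec : Claim_equal_get_system_base := by
  intro n _
  unfold Spec_get_system_base get_system_base get_system_base_alt
  by_cases h0 : n = 0
  · subst h0; decide
  · rw [if_neg h0]
    have hpos : 0 < n.natAbs := Int.natAbs_pos.mpr h0
    rw [pvLoopA_eq n.natAbs hpos ""]
    have : PySem.Int.toStr ((n.natAbs : Nat) : Int) = String.ofList (Nat.toDigits 10 n.natAbs) := by
      have h1 : ¬ (|n| < 0) := not_lt.mpr (abs_nonneg n)
      simp [PySem.Int.toStr, PySem.Int.toChars, h1]
      congr 2
      rw [Int.abs_eq_natAbs, Int.toNat_natCast]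
    rw [this, pvToDigits_eq_ref]
    simp
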